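-- pv_equiv track=rewrite | github.com/apache/steve | pysteve/lib/plugins/ap.py | tallyAP
-- ===== SOURCE A (Python) =====
-- def tallyAP(votes, issue):
--     """ Simple YNA tallying
--     :param votes: The JSON object from $issueid.json.votes
--     :return: dict with y,n,a,by,bn numbers as well as pretty-printed version
--     """
--     y = n = a = 0
--     by = bn = 0
--     # For each vote cast, tally it
--     for vote in votes.values():
--         if vote == 'y':
--             y += 1
--         elif vote == 'n':
--             n += 1
--         elif vote == 'a':
--             a += 1
--         elif vote == 'by':
--             by += 1
--         elif vote == 'bn':
--             bn += 1
--         else: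
--             raise Exception("Invalid vote found in votes db!")
--
--     js = {
--         'votes': len(votes),
--         'yes': y,
--         'no': n,
--         'abstain': a,
--         'binding_yes': by,
--         'binding_no': bn
--     }
--
--     return js, """
-- Yes:            %4u
-- No:             %4u
-- Abstain:        %4u
-- Binding Yes:    %4u
-- Binding No:     %4u
-- """ % (y,n,a,by,bn)
-- ===== SOURCE B (Python) =====
-- def tallyAP(votes, issue):
--     """ Simple YNA tallying: validate once, then count each category with list.count. """
--     vals = list(votes.values())
--     if any(v not in ('y', 'n', 'a', 'by', 'bn') for v in vals):
--         raise Exception("Invalid vote found in votes db!")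
--     y = vals.count('y')
--     n = vals.count('n')
--     a = vals.count('a')
--     by = vals.count('by')
--     bn = vals.count('bn')
--     js = {
--         'votes': len(votes),
--         'yes': y,
--         'no': n,
--         'abstain': a,
--         'binding_yes': by,
--         'binding_no': bn
--     }
--     return js, """
-- Yes:            %4u
-- No:             %4u
-- Abstain:        %4u
-- Binding Yes:    %4u
-- Binding No:     %4u
-- """ % (y, n, a, by, bn)
-- ===== Notes on version B (the rewrite author's own statement) =====
-- stated objective: simpler
-- what changed: B replaces A's single pass with five running counters and an elif chain by a one-shot validity check followed by five independent list.count passes, one per category.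
import Mathlib
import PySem

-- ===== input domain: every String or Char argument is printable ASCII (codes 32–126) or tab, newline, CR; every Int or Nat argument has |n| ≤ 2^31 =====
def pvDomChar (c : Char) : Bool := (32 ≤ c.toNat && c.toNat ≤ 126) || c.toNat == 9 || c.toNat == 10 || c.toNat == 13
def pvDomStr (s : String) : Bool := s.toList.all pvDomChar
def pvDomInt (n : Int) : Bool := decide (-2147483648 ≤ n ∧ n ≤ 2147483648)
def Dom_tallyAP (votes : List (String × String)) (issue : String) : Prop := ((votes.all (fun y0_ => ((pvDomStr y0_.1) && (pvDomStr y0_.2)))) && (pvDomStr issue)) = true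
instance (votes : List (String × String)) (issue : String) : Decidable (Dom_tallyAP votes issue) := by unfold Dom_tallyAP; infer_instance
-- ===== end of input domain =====

-- B replaces A's single-pass five-counter elif chain by one validity check plus
-- five independent list.count passes, one per category (objective: simpler).

-- shared formatting helper: '%4u' (right-justified, width 4) and the literal template of both sources
def pvPad4 (v : Int) : String :=
  let s := PySem.Int.toStr v
  String.ofList (List.replicate (4 - s.toList.length) ' ') ++ s

def pvFmtAP (y n a b c : Int) : String :=
  "\nYes:            " ++ pvPad4 y ++ "\nNo:             " ++ pvPad4 n ++
  "\nAbstain:        " ++ pvPad4 a ++ "\nBinding Yes:    " ++ pvPad4 b ++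
  "\nBinding No:     " ++ pvPad4 c ++ "\n"

-- ===== PORT A =====
-- for vote in votes.values(): elif-chain over five counters; the final else raises
-- (those inputs are outside Pre_, the port leaves the counters unchanged there)
def tallyAP (votes : List (String × String)) (issue : String) : (List (String × Int)) × String :=
  let st := (votes.map Prod.snd).foldl
    (fun (s : Int × Int × Int × Int × Int) vote =>
      let (y, n, a, by_, bn) := s
      if vote = "y" then (y + 1, n, a, by_, bn)
      else if vote = "n" then (y, n + 1, a, by_, bn)
      else if vote = "a" then (y, n, a + 1, by_, bn)
      else if vote = "by" then (y, n, a, by_ + 1, bn)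
      else if vote = "bn" then (y, n, a, by_, bn + 1)
      else s)  -- Python raises here; excluded by Pre_tallyAP
    (0, 0, 0, 0, 0)
  let (y, n, a, by_, bn) := st
  ([("votes", (votes.length : Int)), ("yes", y), ("no", n), ("abstain", a),
    ("binding_yes", by_), ("binding_no", bn)],
   pvFmtAP y n a by_ bn)

-- ===== PORT B =====
def tallyAP_alt (votes : List (String × String)) (issue : String) : (List (String × Int)) × String :=
  if (votes.map Prod.snd).any (fun v => !(v == "y" || v == "n" || v == "a" || v == "by" || v == "bn")) then
    ([], "")  -- Python raises here; excluded by Pre_tallyAP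
  else
    let y : Int := PySem.List.count (votes.map Prod.snd) "y"
    let n : Int := PySem.List.count (votes.map Prod.snd) "n"
    let a : Int := PySem.List.count (votes.map Prod.snd) "a"
    let by_ : Int := PySem.List.count (votes.map Prod.snd) "by"
    let bn : Int := PySem.List.count (votes.map Prod.snd) "bn"
    ([("votes", (votes.length : Int)), ("yes", y), ("no", n), ("abstain", a),
      ("binding_yes", by_), ("binding_no", bn)],
     pvFmtAP y n a by_ bn)

-- ===== PRECONDITION & SPEC =====
-- Pre_ excludes exactly the inputs on which A raises Exception: some vote value
-- outside {'y','n','a','by','bn'} (B raises the same exception there).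
def Pre_tallyAP (votes : List (String × String)) (issue : String) : Prop :=
  (votes.all (fun kv => kv.2 == "y" || kv.2 == "n" || kv.2 == "a" || kv.2 == "by" || kv.2 == "bn")) = true
instance (votes : List (String × String)) (issue : String) : Decidable (Pre_tallyAP votes issue) := by
  unfold Pre_tallyAP; infer_instance

def pvWitness_tallyAP : (List (String × String)) × String :=
  ([("alice", "y"), ("bob", "bn"), ("carol", "y")], "issue42")

def Spec_tallyAP (votes : List (String × String)) (issue : String) (out : (List (String × Int)) × String) : Prop := out = tallyAP_alt votes issue
instance (votes : List (String × String)) (issue : String) (out : (List (String × Int)) × String) : Decidable (Spec_tallyAP votes issue out) := by unfold Spec_tallyAP; infer_instance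

-- ===== CLAIM =====
def Claim_equal_tallyAP : Prop := ∀ (votes : List (String × String)) (issue : String), Dom_tallyAP votes issue → Pre_tallyAP votes issue → Spec_tallyAP votes issue (tallyAP votes issue)

-- ===== LEMMAS AND PROOFS =====

-- A's fold yields the five occurrence counts of the value list
theorem pv_foldA_counts (vals : List String) (y n a b c : Int) :
    vals.foldl
      (fun (s : Int × Int × Int × Int × Int) vote =>
        let (y, n, a, by_, bn) := s
        if vote = "y" then (y + 1, n, a, by_, bn)
        else if vote = "n" then (y, n + 1, a, by_, bn)
        else if vote = "a" then (y, n, a + 1, by_, bn)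
        else if vote = "by" then (y, n, a, by_ + 1, bn)
        else if vote = "bn" then (y, n, a, by_, bn + 1)
        else s)
      (y, n, a, b, c)
    = (y + vals.count "y", n + vals.count "n", a + vals.count "a",
       b + vals.count "by", c + vals.count "bn") := by
  induction vals generalizing y n a b c with
  | nil => simp
  | cons v vs ih =>
    simp only [List.foldl_cons]
    split_ifs with h1 h2 h3 h4 h5 <;>
      rw [ih] <;> simp [*, Prod.ext_iff] <;> omega

-- ===== VERDICT =====

theorem tallyAP_spec : Claim_equal_tallyAP := by
  intro votes issue _hdom hpre
  have hany : ((votes.map Prod.snd).any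
      (fun v => !(v == "y" || v == "n" || v == "a" || v == "by" || v == "bn"))) = false := by
    rw [List.any_eq_false]
    intro v hv
    obtain ⟨kv, hmem, rfl⟩ := List.mem_map.mp hv
    rw [Pre_tallyAP, List.all_eq_true] at hpre
    simp [hpre kv hmem]
  unfold Spec_tallyAP tallyAP tallyAP_alt
  rw [pv_foldA_counts, hany]
  simp only [Bool.false_eq_true, if_false, PySem.List.count_eq, zero_add]
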